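-- pv_equiv track=rewrite | github.com/dgoffredo/leetcode | partition-array-into-disjoint-intervals/heuristic.py | partition_point
-- ===== SOURCE A (Python) =====
-- def partition_point(values):
--     assert len(values) >= 2
--
--     end_index = 0
--     max_seen_since = [values[0] for _ in values]
--
--     for i, value in enumerate(values[1:], 1):
--         if value < max_seen_since[end_index]:
--             # We have to update our end index
--             end_index = i
--
--         max_seen_since[i] = max(max_seen_since[i - 1], value)
--
--     return end_index + 1
-- ===== SOURCE B (Python) =====
-- def partition_point(values):
--     assert len(values) >= 2
--
--     # Build the suffix-min table backwards: suffix_min[i] == min(values[i:]).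
--     m = values[-1]
--     suffix_min = [m]
--     for v in reversed(values[:-1]):
--         m = min(v, m)
--         suffix_min.append(m)
--     suffix_min.reverse()
--
--     # First k where the max of the left part is <= the min of the right part.
--     prefix_max = values[0]
--     k = 1
--     for v, m in zip(values[1:], suffix_min[1:]):
--         if prefix_max <= m:
--             return k
--         prefix_max = max(prefix_max, v)
--         k += 1
--     return k
-- ===== Notes on version B (the rewrite author's own statement) =====
-- stated objective: alternative
-- what changed: Replaces A's online greedy that tracks a boundary index into a growing prefix-max array with a two-phase decomposition: build a suffix-min table by a backward pass, then scan forward with a running prefix max and return the first k where prefix max <= suffix min.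
import Mathlib
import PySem

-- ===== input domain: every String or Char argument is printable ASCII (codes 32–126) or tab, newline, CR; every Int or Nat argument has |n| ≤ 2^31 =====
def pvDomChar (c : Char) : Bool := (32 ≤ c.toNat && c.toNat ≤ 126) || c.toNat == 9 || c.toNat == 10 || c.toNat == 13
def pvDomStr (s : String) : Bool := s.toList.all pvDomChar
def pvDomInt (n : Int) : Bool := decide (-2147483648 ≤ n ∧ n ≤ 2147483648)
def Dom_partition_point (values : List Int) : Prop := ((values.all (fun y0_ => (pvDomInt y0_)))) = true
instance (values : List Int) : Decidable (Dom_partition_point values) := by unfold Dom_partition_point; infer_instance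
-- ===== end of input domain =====

-- B rebuilds the partition point with a suffix-min table plus a forward prefix-max scan
-- instead of A's online greedy boundary tracking (objective: alternative decomposition).


-- ===== PORT A =====
-- one loop step of A: (end_index, max_seen_since) updated by the pair (i, value);
-- the Python indices from enumerate(…, 1) are nonnegative, so .toNat is exact here
def ppStepA (st : Nat × List Int) (p : Int × Int) : Nat × List Int :=
  let i := p.1.toNat
  let e := if p.2 < st.2.getD st.1 0 then i else st.1
  (e, st.2.set i (max (st.2.getD (i - 1) 0) p.2))

def partition_point (values : List Int) : Int :=
  -- assert len(values) >= 2 : lists shorter than 2 are excluded by Pre_ (AssertionError)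
  let v0 := (PySem.List.pyGet? values 0).getD 0          -- values[0], in range under Pre_
  let ms := values.map (fun _ => v0)                      -- [values[0] for _ in values]
  let st := (PySem.List.enumerate (PySem.List.slice values (some 1) none) 1).foldl ppStepA (0, ms)
  (st.1 : Int) + 1

-- ===== PORT B =====
-- one backward step of Source B's suffix-min loop: (m, suffix_min) with append at the end
def ppStepM (st : Int × List Int) (v : Int) : Int × List Int :=
  let m := min v st.1
  (m, st.2 ++ [m])

-- Source B's forward scan with early return: prefix_max, k, zip(values[1:], suffix_min[1:])
def ppScan (pm : Int) (k : Int) : List (Int × Int) → Int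
  | [] => k
  | (v, m) :: rest => if pm ≤ m then k else ppScan (max pm v) (k + 1) rest

def partition_point_alt (values : List Int) : Int :=
  -- assert len(values) >= 2 : same precondition as A
  let m0 := (PySem.List.pyGet? values (-1)).getD 0        -- values[-1], in range under Pre_
  let st := ((PySem.List.slice values none (some (-1))).reverse).foldl ppStepM (m0, [m0])
  let suffixMin := st.2.reverse
  let pm0 := (PySem.List.pyGet? values 0).getD 0          -- values[0]
  ppScan pm0 1 ((PySem.List.slice values (some 1) none).zip (PySem.List.slice suffixMin (some 1) none))

-- ===== PRECONDITION & SPEC =====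
-- A (and B) assert len(values) >= 2; shorter lists raise AssertionError in both.
def Pre_partition_point (values : List Int) : Prop := 2 ≤ values.length
instance (values : List Int) : Decidable (Pre_partition_point values) := by unfold Pre_partition_point; infer_instance
def pvWitness_partition_point : List Int := [5, 0, 3, 8, 6]

def Spec_partition_point (values : List Int) (out : Int) : Prop := out = partition_point_alt values
instance (values : List Int) (out : Int) : Decidable (Spec_partition_point values out) := by unfold Spec_partition_point; infer_instance

-- ===== CLAIM (what is proved, stated in full; the proofs are below) =====
def Claim_equal_partition_point : Prop := ∀ (values : List Int), Dom_partition_point values → Pre_partition_point values → Spec_partition_point values (partition_point values)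

-- ===== LEMMAS AND PROOFS =====

-- abstract version of A's greedy: em = max of values[:e+1], am = max of values[:i]
def ppG (em am : Int) (e i : Nat) : List Int → Nat
  | [] => e
  | v :: rs => if v < em then ppG (max am v) (max am v) i (i + 1) rs else ppG em (max am v) e (i + 1) rs

-- "first valid boundary at or after i", entered knowing some earlier boundary failed
def ppH (am : Int) (i : Nat) : List Int → Nat
  | [] => i
  | v :: rs => if ∀ x ∈ rs, max am v ≤ x then i else ppH (max am v) (i + 1) rs

-- abstract version of B's scan: first k with prefix max ≤ all of the rest
def ppSpec (pm : Int) (k : Nat) : List Int → Nat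
  | [] => k
  | v :: rs => if ∀ x ∈ v :: rs, pm ≤ x then k else ppSpec (max pm v) (k + 1) rs

-- mathematical suffix-min list: (suffixMins l)[i] = min of l.drop i
def suffixMins : List Int → List Int
  | [] => []
  | [v] => [v]
  | v :: w :: ws => min v ((suffixMins (w :: ws)).headD 0) :: suffixMins (w :: ws)

lemma suffixMins_cons_eq (v : Int) (vs : List Int) :
    suffixMins (v :: vs) = (suffixMins (v :: vs)).headD 0 :: suffixMins vs := by
  cases vs with
  | nil => simp [suffixMins]
  | cons w ws => simp [suffixMins]

lemma headD_suffixMins_cons_cons (v w : Int) (ws : List Int) :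
    (suffixMins (v :: w :: ws)).headD 0 = min v ((suffixMins (w :: ws)).headD 0) := by
  simp [suffixMins]

lemma headD_suffixMins_le_iff (pm v : Int) (vs : List Int) :
    (pm ≤ (suffixMins (v :: vs)).headD 0) ↔ ∀ x ∈ v :: vs, pm ≤ x := by
  induction vs generalizing v with
  | nil => simp [suffixMins]
  | cons w ws ih =>
    rw [headD_suffixMins_cons_cons, le_min_iff, ih w]
    simp only [List.mem_cons, forall_eq_or_imp]

-- A's fold over the enumerated tail, with the max_seen_since array eliminated
lemma foldA_eq_ppG (rest : List Int) : ∀ (i e : Nat) (ms : List Int),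
    e < i → i + rest.length ≤ ms.length →
    ((PySem.List.enumerate rest (i : Int)).foldl ppStepA (e, ms)).1
      = ppG (ms.getD e 0) (ms.getD (i - 1) 0) e i rest := by
  induction rest with
  | nil => intro i e ms _ _; simp [PySem.List.enumerate_nil, ppG]
  | cons v rs ih =>
    intro i e ms he hlen
    have hi : i < ms.length := by simp at hlen; omega
    rw [PySem.List.enumerate_cons, List.foldl_cons]
    have hstep : ppStepA (e, ms) ((i : Int), v)
        = (if v < ms.getD e 0 then i else e,
           ms.set i (max (ms.getD (i - 1) 0) v)) := by
      simp [ppStepA]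
    rw [hstep, show ((i : Int) + 1) = (((i + 1 : Nat)) : Int) from by push_cast; ring]
    rw [ih (i + 1) _ _ (by split <;> omega) (by simp at hlen ⊢; omega)]
    have hset_i : (ms.set i (max (ms.getD (i - 1) 0) v)).getD i 0
        = max (ms.getD (i - 1) 0) v := by
      simp [List.getD, List.getElem?_set_self hi]
    by_cases hv : v < ms.getD e 0
    · simp only [hv, if_true, Nat.add_sub_cancel, hset_i]
      rw [ppG, if_pos hv]
    · have hne : e ≠ i := by omega
      have hset_e : (ms.set i (max (ms.getD (i - 1) 0) v)).getD e 0 = ms.getD e 0 := by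
        simp [List.getD, List.getElem?_set_ne (by omega : i ≠ e)]
      simp only [hv, if_false, Nat.add_sub_cancel, hset_i, hset_e]
      rw [ppG, if_neg hv]

-- greedy = "keep e while everything ≥ em, else restart the search from here"
lemma ppG_eq_ppH (rest : List Int) : ∀ (em am : Int) (e i : Nat), em ≤ am →
    ppG em am e i rest = if ∀ x ∈ rest, em ≤ x then e else ppH am i rest := by
  induction rest with
  | nil => intro em am e i _; simp [ppG]
  | cons v rs ih =>
    intro em am e i hle
    rw [ppG]
    by_cases hv : v < em
    · rw [if_pos hv, ih _ _ _ _ (le_refl _), ppH]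
      have : ¬ ∀ x ∈ v :: rs, em ≤ x := by
        intro h; exact absurd (h v (by simp)) (by omega)
      rw [if_neg this]
    · rw [if_neg hv, ih _ _ _ _ (le_trans hle (le_max_left _ _))]
      by_cases hall : ∀ x ∈ rs, em ≤ x
      · rw [if_pos hall, if_pos (by intro x hx; rcases List.mem_cons.mp hx with h | h
                                    · omega
                                    · exact hall x h)]
      · rw [if_neg hall, if_neg (by intro h; exact hall (fun x hx => h x (List.mem_cons_of_mem _ hx)))]
        rw [ppH]
        have : ¬ ∀ x ∈ rs, max am v ≤ x := by
          intro h; apply hall; intro x hx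
          exact le_trans (le_trans hle (le_max_left _ _)) (h x hx)
        rw [if_neg this]

-- B's abstract scan = the same ppH, shifted by one
lemma ppSpec_eq_ppH (rest : List Int) : ∀ (am : Int) (i : Nat),
    ppSpec am i rest = if ∀ x ∈ rest, am ≤ x then i else ppH am i rest + 1 := by
  induction rest with
  | nil => intro am i; simp [ppSpec]
  | cons v rs ih =>
    intro am i
    rw [ppSpec]
    by_cases hc : ∀ x ∈ v :: rs, am ≤ x
    · rw [if_pos hc, if_pos hc]
    · rw [if_neg hc, if_neg hc, ih, ppH]
      by_cases hall : ∀ x ∈ rs, max am v ≤ x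
      · rw [if_pos hall, if_pos hall]
      · rw [if_neg hall, if_neg hall]

-- Source B's backward loop builds exactly the reversed suffix-min table
lemma foldM_eq_suffixMins : ∀ (l : List Int), l ≠ [] →
    (l.dropLast.reverse).foldl ppStepM (l.getLast?.getD 0, [l.getLast?.getD 0])
      = ((suffixMins l).headD 0, (suffixMins l).reverse) := by
  intro l
  induction l with
  | nil => intro h; exact absurd rfl h
  | cons v vs ih =>
    intro _
    cases vs with
    | nil => simp [suffixMins]
    | cons w ws =>
      have hdl : (v :: w :: ws).dropLast = v :: (w :: ws).dropLast := rfl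
      rw [hdl, List.reverse_cons, List.foldl_append, List.getLast?_cons_cons,
        ih (by simp), suffixMins_cons_eq v (w :: ws), headD_suffixMins_cons_cons]
      simp [ppStepM, List.reverse_cons]

-- B's scan over the zipped suffix-min = ppSpec
lemma ppScan_eq_ppSpec (vs : List Int) : ∀ (pm : Int) (k : Nat),
    ppScan pm (k : Int) (vs.zip (suffixMins vs)) = ((ppSpec pm k vs : Nat) : Int) := by
  induction vs with
  | nil => intro pm k; simp [ppScan, ppSpec]
  | cons v rs ih =>
    intro pm k
    rw [suffixMins_cons_eq v rs]
    simp only [List.zip_cons_cons, ppScan, ppSpec]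
    have hc := headD_suffixMins_le_iff pm v rs
    by_cases hm : pm ≤ (suffixMins (v :: rs)).headD 0
    · rw [if_pos hm, if_pos (hc.mp hm)]
    · rw [if_neg hm, if_neg (fun h => hm (hc.mpr h)),
        show (k : Int) + 1 = ((k + 1 : Nat) : Int) from by push_cast; ring, ih]

-- ===== VERDICT (by name: the statement is the Claim_ definition above) =====
theorem partition_point_spec : Claim_equal_partition_point := by
  intro values _hdom hpre
  unfold Spec_partition_point
  cases values with
  | nil => simp [Pre_partition_point] at hpre
  | cons v0 vs =>
    -- A's side reduced to the abstract greedy ppG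
    have hA : partition_point (v0 :: vs) = ((ppG v0 v0 0 1 vs : Nat) : Int) + 1 := by
      simp only [partition_point, PySem.List.pyGet?_zero_cons, Option.getD_some,
        PySem.List.slice_from_one, List.tail_cons, List.map_cons]
      rw [show (1 : Int) = ((1 : Nat) : Int) from rfl,
        foldA_eq_ppG vs 1 0 (v0 :: vs.map (fun _ => v0)) (by omega)
          (by simp only [List.length_cons, List.length_map]; omega)]
      simp [List.getD]
    -- B's side reduced to the abstract scan ppSpec
    have hB : partition_point_alt (v0 :: vs) = ((ppSpec v0 1 vs : Nat) : Int) := by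
      simp only [partition_point_alt, PySem.List.pyGet?_neg_one,
        PySem.List.slice_to_neg_one, PySem.List.pyGet?_zero_cons, Option.getD_some,
        PySem.List.slice_from_one, List.tail_cons]
      rw [foldM_eq_suffixMins (v0 :: vs) (by simp)]
      rw [show ((((suffixMins (v0 :: vs)).headD 0, (suffixMins (v0 :: vs)).reverse) :
            Int × List Int).2.reverse) = suffixMins (v0 :: vs) from List.reverse_reverse _]
      rw [suffixMins_cons_eq v0 vs, List.tail_cons,
        show (1 : Int) = ((1 : Nat) : Int) from rfl, ppScan_eq_ppSpec]
    rw [hA, hB, ppG_eq_ppH vs v0 v0 0 1 le_rfl, ppSpec_eq_ppH]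
    split_ifs <;> omega
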